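-- pv_equiv track=rewrite | github.com/Mookimooki/algorithm | 09-03/1.py | solution
-- ===== SOURCE A (Python) =====
-- def solution(v):
--     rows, cols = len(v), len(v[0])
--     visited = [[False for _ in range(cols)] for _ in range(rows)]
--     cnt, maxArea = 0, 0
--     directions = [(0, 1), (1, 0), (0, -1), (-1, 0)]  # Right, Down, Left, Up
--
--     for row in range(rows):
--         for col in range(cols):
--             if v[row][col] == 1 and not visited[row][col]:
--                 cnt += 1
--                 visited[row][col] = True
--                 queue, area = [(row, col)], 1
--
--                 while queue:
--                     curRow, curCol = queue.pop(0)
--                     for dr, dc in directions: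
--                         newRow, newCol = curRow + dr, curCol + dc
--                         if 0 <= newRow < rows and 0 <= newCol < cols:
--                             if v[newRow][newCol] == 1 and not visited[newRow][newCol]:
--                                 queue.append((newRow, newCol))
--                                 visited[newRow][newCol] = True
--                                 area += 1
--
--                 maxArea = max(maxArea, area)
--
--     return [cnt, maxArea]
-- ===== SOURCE B (Python) =====
-- def solution(v):
--     rows, cols = len(v), len(v[0])
--     visited = set()
--     cnt, maxArea = 0, 0
--     for idx in range(rows * cols):
--         r, c = idx // cols, idx % cols
--         if v[r][c] == 1 and (r, c) not in visited:
--             cnt += 1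
--             visited.add((r, c))
--             stack, area = [(r, c)], 1
--             while stack:
--                 cr, cc = stack.pop()
--                 for nr, nc in ((cr, cc + 1), (cr + 1, cc), (cr, cc - 1), (cr - 1, cc)):
--                     if 0 <= nr < rows and 0 <= nc < cols and v[nr][nc] == 1 and (nr, nc) not in visited:
--                         visited.add((nr, nc))
--                         stack.append((nr, nc))
--                         area += 1
--             if area > maxArea:
--                 maxArea = area
--     return [cnt, maxArea]
-- ===== Notes on version B (the rewrite author's own statement) =====
-- stated objective: alternative
-- what changed: A scans the grid with two nested row/column loops, keeps a 2-D boolean visited matrix and grows each island by BFS with queue.pop(0); B scans a single flattened index range recovering (r,c) by divmod, keeps a visited set of coordinate tuples and grows each island by iterative DFS with stack.pop().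
import Mathlib
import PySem

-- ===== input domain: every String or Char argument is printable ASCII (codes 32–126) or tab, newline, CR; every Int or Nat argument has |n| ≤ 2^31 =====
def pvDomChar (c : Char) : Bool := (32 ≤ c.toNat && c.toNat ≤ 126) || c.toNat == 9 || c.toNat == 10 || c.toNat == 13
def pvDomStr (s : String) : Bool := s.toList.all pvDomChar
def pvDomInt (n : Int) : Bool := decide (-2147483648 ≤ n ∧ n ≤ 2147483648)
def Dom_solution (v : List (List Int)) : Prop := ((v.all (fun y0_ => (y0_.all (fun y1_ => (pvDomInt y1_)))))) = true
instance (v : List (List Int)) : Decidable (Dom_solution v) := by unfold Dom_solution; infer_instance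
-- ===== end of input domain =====

-- B replaces A's row-major BFS with queue.pop(0) and a 2-D visited matrix by a single flattened
-- scan with divmod and a DFS over an explicit stack with a visited set of coordinate tuples
-- (alternative decomposition; same exact [count, max-area] result).

-- ===== PORT A =====
-- v[r][c] (both Pythons index the grid the same way; accesses are guarded in-bounds)
def pvCell (v : List (List Int)) (r c : Int) : Int :=
  PySem.List.pyGetD (PySem.List.pyGetD v r []) c 0

-- visited[r][c] read / write on A's matrix of booleans (writes are guarded in-bounds)
def pvVis (V : List (List Bool)) (r c : Int) : Bool :=
  PySem.List.pyGetD (PySem.List.pyGetD V r []) c false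

def pvMark (V : List (List Bool)) (r c : Int) : List (List Bool) :=
  V.set r.toNat ((PySem.List.pyGetD V r []).set c.toNat true)

def pvDirs : List (Int × Int) := [(0, 1), (1, 0), (0, -1), (-1, 0)]

def pvStepA (v : List (List Int)) (rows cols r c : Int)
    (st : List (Int × Int) × List (List Bool) × Int) (d : Int × Int) :
    List (Int × Int) × List (List Bool) × Int :=
  if 0 ≤ r + d.1 ∧ r + d.1 < rows ∧ 0 ≤ c + d.2 ∧ c + d.2 < cols ∧
      pvCell v (r + d.1) (c + d.2) = 1 ∧ pvVis st.2.1 (r + d.1) (c + d.2) = false then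
    (st.1 ++ [(r + d.1, c + d.2)], pvMark st.2.1 (r + d.1) (c + d.2), st.2.2 + 1)
  else st

-- fuel for A's while loop: number of unvisited entries + queue length never increases and
-- drops by one each iteration, so this fuel is never exhausted
def pvFalses (V : List (List Bool)) : Nat := (V.map (List.count false)).sum

def pvFloodA (v : List (List Int)) (rows cols : Int) :
    Nat → List (Int × Int) → List (List Bool) → Int → List (List Bool) × Int
  | 0, _, V, area => (V, area)
  | _ + 1, [], V, area => (V, area)
  | fuel + 1, p :: Q, V, area =>
    let st := pvDirs.foldl (pvStepA v rows cols p.1 p.2) (Q, V, area)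
    pvFloodA v rows cols fuel st.1 st.2.1 st.2.2

def solution (v : List (List Int)) : List Int :=
  let rows : Int := v.length
  let cols : Int := v.headI.length
  let fin := (PySem.List.pyRange 0 rows 1).foldl (fun st row =>
      (PySem.List.pyRange 0 cols 1).foldl (fun st col =>
        if pvCell v row col = 1 ∧ pvVis st.1 row col = false then
          let V1 := pvMark st.1 row col
          let res := pvFloodA v rows cols (pvFalses V1 + 2) [(row, col)] V1 1
          (res.1, st.2.1 + 1, max st.2.2 res.2)
        else st) st)
    (List.replicate v.length (List.replicate v.headI.length false), (0 : Int), (0 : Int))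
  [fin.2.1, fin.2.2]

-- ===== PORT B =====
def pvNbrs (p : Int × Int) : List (Int × Int) :=
  [(p.1, p.2 + 1), (p.1 + 1, p.2), (p.1, p.2 - 1), (p.1 - 1, p.2)]

def pvStepB (v : List (List Int)) (rows cols : Int)
    (st : List (Int × Int) × PySem.Set (Int × Int) × Int) (q : Int × Int) :
    List (Int × Int) × PySem.Set (Int × Int) × Int :=
  if 0 ≤ q.1 ∧ q.1 < rows ∧ 0 ≤ q.2 ∧ q.2 < cols ∧
      pvCell v q.1 q.2 = 1 ∧ PySem.Set.contains st.2.1 q = false then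
    (st.1 ++ [q], PySem.Set.add st.2.1 q, st.2.2 + 1)
  else st

-- fuel for B's while loop, same invariant as A's (cells not yet in the visited set)
def pvFree (rows cols : Int) (S : PySem.Set (Int × Int)) : Nat :=
  ((PySem.List.pyRange 0 rows 1) ×ˢ (PySem.List.pyRange 0 cols 1)).countP
    (fun p => !(PySem.Set.contains S p))

def pvFloodB (v : List (List Int)) (rows cols : Int) :
    Nat → List (Int × Int) → PySem.Set (Int × Int) → Int → PySem.Set (Int × Int) × Int
  | 0, _, S, area => (S, area)
  | fuel + 1, Q, S, area =>
    match PySem.List.pop? Q (-1) with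
    | none => (S, area)
    | some (p, Q') =>
      let st := (pvNbrs p).foldl (pvStepB v rows cols) (Q', S, area)
      pvFloodB v rows cols fuel st.1 st.2.1 st.2.2

def solution_alt (v : List (List Int)) : List Int :=
  let rows : Int := v.length
  let cols : Int := v.headI.length
  let fin := (PySem.List.pyRange 0 (rows * cols) 1).foldl (fun st idx =>
      let r := PySem.Int.floordiv idx cols
      let c := PySem.Int.mod idx cols
      if pvCell v r c = 1 ∧ PySem.Set.contains st.1 (r, c) = false then
        let S1 := PySem.Set.add st.1 (r, c)
        let res := pvFloodB v rows cols (pvFree rows cols S1 + 2) [(r, c)] S1 1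
        (res.1, st.2.1 + 1, if res.2 > st.2.2 then res.2 else st.2.2)
      else st)
    ((PySem.Set.empty : PySem.Set (Int × Int)), (0 : Int), (0 : Int))
  [fin.2.1, fin.2.2]

-- ===== PRECONDITION & SPEC =====
-- Pre_ excludes exactly the inputs on which Python A raises IndexError: the empty grid
-- (len(v[0])) and ragged grids in which some row is shorter than the first row.
def Pre_solution (v : List (List Int)) : Prop :=
  v ≠ [] ∧ ∀ row ∈ v, v.headI.length ≤ row.length

instance (v : List (List Int)) : Decidable (Pre_solution v) := by
  unfold Pre_solution; infer_instance

def pvWitness_solution : List (List Int) := [[1, 0], [1, 1]]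

def Spec_solution (v : List (List Int)) (out : List Int) : Prop := out = solution_alt v
instance (v : List (List Int)) (out : List Int) : Decidable (Spec_solution v out) := by
  unfold Spec_solution; infer_instance

-- ===== CLAIM (what is proved, stated in full; the proofs are below) =====
def Claim_equal_solution : Prop :=
  ∀ (v : List (List Int)), Dom_solution v → Pre_solution v → Spec_solution v (solution v)

-- ===== LEMMAS AND PROOFS =====

-- spec-side vocabulary: cells, the 4-neighbour graph on 1-cells, and the abstractions of
-- the two visited representations
def pvInB (v : List (List Int)) (p : Int × Int) : Prop :=
  0 ≤ p.1 ∧ p.1 < (v.length : Int) ∧ 0 ≤ p.2 ∧ p.2 < (v.headI.length : Int)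

def pvOne (v : List (List Int)) (p : Int × Int) : Prop := pvInB v p ∧ pvCell v p.1 p.2 = 1

def pvRel (v : List (List Int)) (p q : Int × Int) : Prop := pvOne v p ∧ pvOne v q ∧ q ∈ pvNbrs p

def pvReach (v : List (List Int)) (s p : Int × Int) : Prop := Relation.ReflTransGen (pvRel v) s p

def pvVsA (v : List (List Int)) (V : List (List Bool)) : Set (Int × Int) :=
  {p | pvInB v p ∧ pvVis V p.1 p.2 = true}

def pvVsB (S : PySem.Set (Int × Int)) : Set (Int × Int) := {p | p ∈ S}

def pvShape (v : List (List Int)) (V : List (List Bool)) : Prop :=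
  V.length = v.length ∧ ∀ row ∈ V, row.length = v.headI.length

def pvClosed (v : List (List Int)) (s : Set (Int × Int)) : Prop :=
  ∀ p ∈ s, ∀ q, pvRel v p q → q ∈ s

lemma pvVis_eq (v : List (List Int)) (V : List (List Bool)) (r c : Int)
    (hs : pvShape v V) (hr : 0 ≤ r ∧ r < (v.length : Int))
    (hc : 0 ≤ c ∧ c < (v.headI.length : Int)) :
    ∃ (h1 : r.toNat < V.length) (h2 : c.toNat < (V[r.toNat]).length),
      pvVis V r c = (V[r.toNat])[c.toNat] := by
  obtain ⟨hl, hrow⟩ := hs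
  have h1 : r.toNat < V.length := by omega
  have h2 : c.toNat < (V[r.toNat]).length := by
    rw [hrow _ (List.getElem_mem h1)]; omega
  refine ⟨h1, h2, ?_⟩
  unfold pvVis
  rw [PySem.List.pyGetD_eq_getElem V [] hr.1 (by omega),
      PySem.List.pyGetD_eq_getElem _ false hc.1 (by omega)]

lemma pvSum_set (l : List Nat) (i : Nat) (x : Nat) (h : i < l.length) :
    (l.set i x).sum + l[i] = l.sum + x := by
  induction l generalizing i with
  | nil => simp at h
  | cons a t ih =>
    cases i with
    | zero => simp [List.set]; omega
    | succ j =>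
      simp only [List.set, List.sum_cons, List.getElem_cons_succ]
      have := ih j (by simpa using h); omega

lemma pvCountP_swap (l : List (Int × Int)) (p : Int × Int) (f g : Int × Int → Bool)
    (hl : l.Nodup) (hp : p ∈ l)
    (hfg : ∀ x ∈ l, x ≠ p → f x = g x) (hfp : f p = false) (hgp : g p = true) :
    l.countP f + 1 = l.countP g := by
  have hperm : l.Perm (p :: l.erase p) := List.perm_cons_erase hp
  rw [hperm.countP_eq f, hperm.countP_eq g]
  have hne : p ∉ l.erase p := (List.Nodup.mem_erase_iff hl).not.mpr (by simp)
  simp only [List.countP_cons, hfp, hgp]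
  have heq : (l.erase p).countP f = (l.erase p).countP g := by
    apply List.countP_congr
    intro x hx
    rw [hfg x (List.mem_of_mem_erase hx) (by rintro rfl; exact hne hx)]
  simp [heq]

lemma pvVsA_finite (v : List (List Int)) (V : List (List Bool)) : (pvVsA v V).Finite := by
  apply Set.Finite.subset (Set.Finite.prod (Set.finite_Ico (0 : Int) v.length)
    (Set.finite_Ico (0 : Int) v.headI.length))
  intro p hp
  obtain ⟨⟨h1, h2, h3, h4⟩, -⟩ := hp
  exact ⟨⟨h1, h2⟩, ⟨h3, h4⟩⟩

lemma pvVsB_finite (S : PySem.Set (Int × Int)) : (pvVsB S).Finite := S.finite_toSet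

lemma pvShape_mark (v : List (List Int)) (V : List (List Bool)) (p : Int × Int)
    (hs : pvShape v V) (hp : pvInB v p) : pvShape v (pvMark V p.1 p.2) := by
  obtain ⟨hl, hrow⟩ := hs
  obtain ⟨h1, h2, h3, h4⟩ := hp
  constructor
  · simp [pvMark, hl]
  · intro row hm
    rcases List.mem_or_eq_of_mem_set hm with h | h
    · exact hrow _ h
    · subst h
      rw [List.length_set]
      have hr : p.1.toNat < V.length := by omega
      rw [PySem.List.pyGetD_eq_getElem V [] h1 (by omega)]
      exact hrow _ (List.getElem_mem hr)

lemma pvVis_mark (v : List (List Int)) (V : List (List Bool)) (p x : Int × Int)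
    (hs : pvShape v V) (hp : pvInB v p) (hx : pvInB v x) :
    pvVis (pvMark V p.1 p.2) x.1 x.2 = if x = p then true else pvVis V x.1 x.2 := by
  have hs' := pvShape_mark v V p hs hp
  obtain ⟨hx1, hx2, hx3, hx4⟩ := hx
  obtain ⟨hp1, hp2, hp3, hp4⟩ := hp
  obtain ⟨a1, a2, he⟩ := pvVis_eq v _ x.1 x.2 hs' ⟨hx1, hx2⟩ ⟨hx3, hx4⟩
  obtain ⟨b1, b2, ge⟩ := pvVis_eq v V x.1 x.2 hs ⟨hx1, hx2⟩ ⟨hx3, hx4⟩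
  rw [he, ge]
  have hrow : PySem.List.pyGetD V p.1 [] = V[p.1.toNat]'(by have := hs.1; omega) :=
    PySem.List.pyGetD_eq_getElem V [] hp1 (by have := hs.1; omega)
  unfold pvMark at a1 a2 ⊢
  by_cases hxp : x = p
  · subst hxp
    simp [hrow]
  · rw [if_neg hxp]
    by_cases h1 : p.1.toNat = x.1.toNat
    · have hx1p : x.1 = p.1 := by omega
      by_cases h2 : p.2.toNat = x.2.toNat
      · exfalso; apply hxp; have hx2p : x.2 = p.2 := by omega
        exact Prod.ext hx1p hx2p
      · simp [hrow, h1, h2]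
    · simp [hrow, h1]

lemma pvVsA_mark (v : List (List Int)) (V : List (List Bool)) (p : Int × Int)
    (hs : pvShape v V) (hp : pvInB v p) :
    pvVsA v (pvMark V p.1 p.2) = insert p (pvVsA v V) := by
  ext x
  by_cases hx : pvInB v x
  · simp only [pvVsA, Set.mem_setOf_eq, Set.mem_insert_iff, pvVis_mark v V p x hs hp hx]
    by_cases hxp : x = p <;> simp [hxp, hx, hp]
  · simp only [pvVsA, Set.mem_setOf_eq, Set.mem_insert_iff]
    constructor
    · rintro ⟨h, -⟩; exact absurd h hx
    · rintro (rfl | ⟨h, -⟩)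
      · exact absurd hp hx
      · exact absurd h hx

lemma pvFalses_mark (v : List (List Int)) (V : List (List Bool)) (p : Int × Int)
    (hs : pvShape v V) (hp : pvInB v p) (hf : pvVis V p.1 p.2 = false) :
    pvFalses (pvMark V p.1 p.2) + 1 = pvFalses V := by
  obtain ⟨hp1, hp2, hp3, hp4⟩ := hp
  obtain ⟨a1, a2, he⟩ := pvVis_eq v V p.1 p.2 hs ⟨hp1, hp2⟩ ⟨hp3, hp4⟩
  rw [he] at hf
  have hrow : PySem.List.pyGetD V p.1 [] = V[p.1.toNat] :=
    PySem.List.pyGetD_eq_getElem V [] hp1 (by have := hs.1; omega)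
  have hcnt : (V[p.1.toNat].set p.2.toNat true).count false + 1 = V[p.1.toNat].count false := by
    have h1 : 0 < List.count false V[p.1.toNat] := by
      rw [List.count_pos_iff]; exact hf ▸ List.getElem_mem a2
    rw [List.count_set]
    · simp [hf]; omega
    · exact a2
  unfold pvFalses pvMark
  rw [hrow, List.map_set]
  have hks := pvSum_set (V.map (List.count false)) p.1.toNat
      (List.count false (V[p.1.toNat].set p.2.toNat true)) (by simpa using a1)
  rw [List.getElem_map] at hks
  omega

lemma pvVsB_add (S : PySem.Set (Int × Int)) (p : Int × Int) :
    pvVsB (PySem.Set.add S p) = insert p (pvVsB S) := by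
  ext x
  simp only [pvVsB, Set.mem_setOf_eq, Set.mem_insert_iff, PySem.Set.mem_add]
  exact or_comm

lemma pvFree_add (v : List (List Int)) (S : PySem.Set (Int × Int)) (p : Int × Int)
    (hp : pvInB v p) (hnp : p ∉ S) :
    pvFree (v.length : Int) (v.headI.length : Int) (PySem.Set.add S p) + 1
      = pvFree (v.length : Int) (v.headI.length : Int) S := by
  obtain ⟨h1, h2, h3, h4⟩ := hp
  apply pvCountP_swap
  · exact List.Nodup.product (PySem.List.nodup_pyRange_one _ _) (PySem.List.nodup_pyRange_one _ _)
  · exact List.mem_product.mpr ⟨(PySem.List.mem_pyRange_one).mpr ⟨h1, h2⟩,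
      (PySem.List.mem_pyRange_one).mpr ⟨h3, h4⟩⟩
  · intro x hx hxp
    have heq : PySem.Set.contains (PySem.Set.add S p) x = PySem.Set.contains S x := by
      rw [Bool.eq_iff_iff, PySem.Set.contains_iff, PySem.Set.contains_iff, PySem.Set.mem_add]
      constructor
      · rintro (h | rfl)
        · exact h
        · exact absurd rfl hxp
      · exact Or.inl
    rw [heq]
  · simp [PySem.Set.mem_add]
  · simp
    intro h; exact absurd h hnp

-- ncard bookkeeping: one new element added to the "newly marked" difference set
lemma pv_ncard_step (s t : Set (Int × Int)) (ht : t.Finite) (p : Int × Int)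
    (hp : p ∈ t) (hns : p ∉ s) :
    (t \ s).ncard = (t \ insert p s).ncard + 1 := by
  have he : t \ s = insert p (t \ insert p s) := by
    ext x; by_cases hx : x = p <;> simp [hx, hns, hp]
  rw [he, Set.ncard_insert_of_notMem (by simp)
    ((ht.diff).subset (by intro x hx; simp at hx ⊢; tauto))]

lemma pv_ncard_split (a b c : Set (Int × Int)) (hab : a ⊆ b) (hbc : b ⊆ c) (hc : c.Finite) :
    ((c \ a).ncard : Int) = ((c \ b).ncard : Int) + ((b \ a).ncard : Int) := by
  have he : c \ a = (c \ b) ∪ (b \ a) := by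
    ext x
    constructor
    · rintro ⟨hxc, hxa⟩
      by_cases hxb : x ∈ b
      · exact Or.inr ⟨hxb, hxa⟩
      · exact Or.inl ⟨hxc, hxb⟩
    · rintro (⟨hxc, hxb⟩ | ⟨hxb, hxa⟩)
      · exact ⟨hxc, fun hxa => hxb (hab hxa)⟩
      · exact ⟨hbc hxb, hxa⟩
  rw [he, Set.ncard_union_eq ?_ (hc.diff) ((hc.subset hbc).diff)]
  · push_cast; ring
  · rw [Set.disjoint_left]
    rintro x ⟨-, hxb⟩ ⟨hxb2, -⟩
    exact hxb hxb2

-- the inner for-loop of A over the four directions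
lemma pvDirsFoldA (v : List (List Int)) (p : Int × Int) (hone : pvOne v p) :
    ∀ (dirs : List (Int × Int)) (Q : List (Int × Int)) (V : List (List Bool)) (area : Int),
    pvShape v V → Q.Nodup → (∀ q ∈ Q, q ∈ pvVsA v V) →
    (∀ d ∈ dirs, (p.1 + d.1, p.2 + d.2) ∈ pvNbrs p) →
    (let R := dirs.foldl (pvStepA v (v.length : Int) (v.headI.length : Int) p.1 p.2) (Q, V, area)
     pvShape v R.2.1 ∧ pvVsA v V ⊆ pvVsA v R.2.1 ∧
     (∀ x ∈ pvVsA v R.2.1, x ∈ pvVsA v V ∨ (pvRel v p x ∧ x ∈ R.1)) ∧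
     (∀ d ∈ dirs, pvOne v (p.1 + d.1, p.2 + d.2) → (p.1 + d.1, p.2 + d.2) ∈ pvVsA v R.2.1) ∧
     (∀ q ∈ R.1, q ∈ Q ∨ pvRel v p q) ∧ R.1.Nodup ∧ (∀ q ∈ R.1, q ∈ pvVsA v R.2.1) ∧
     (∃ L, R.1 = Q ++ L) ∧
     pvFalses R.2.1 + R.1.length = pvFalses V + Q.length ∧
     R.2.2 = area + ((pvVsA v R.2.1 \ pvVsA v V).ncard : Int)) := by
  intro dirs
  induction dirs with
  | nil =>
    intro Q V area hs hnd hQ _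
    refine ⟨hs, fun x hx => hx, fun x hx => Or.inl hx, by simp, fun q hq => Or.inl hq,
      hnd, hQ, ⟨[], by simp⟩, rfl, by simp⟩
  | cons d dirs ih =>
    intro Q V area hs hnd hQ hdirs
    simp only [List.foldl_cons]
    by_cases hg : 0 ≤ p.1 + d.1 ∧ p.1 + d.1 < (v.length : Int) ∧ 0 ≤ p.2 + d.2 ∧
        p.2 + d.2 < (v.headI.length : Int) ∧ pvCell v (p.1 + d.1) (p.2 + d.2) = 1 ∧
        pvVis V (p.1 + d.1) (p.2 + d.2) = false
    · -- the neighbour is a fresh in-bounds 1-cell: enqueue and mark it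
      set pd : Int × Int := (p.1 + d.1, p.2 + d.2) with hpd
      have hstep : pvStepA v (v.length : Int) (v.headI.length : Int) p.1 p.2 (Q, V, area) d
          = (Q ++ [pd], pvMark V pd.1 pd.2, area + 1) := by
        unfold pvStepA; rw [if_pos hg]
      rw [hstep]
      obtain ⟨hb1, hb2, hb3, hb4, hcell, hfresh0⟩ := hg
      have hd0 : pd ∈ pvNbrs p := hdirs d (by simp)
      have hinB : pvInB v pd := by rw [hpd]; exact ⟨hb1, hb2, hb3, hb4⟩
      have honepd : pvOne v pd := ⟨hinB, by rw [hpd]; exact hcell⟩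
      have hfresh : pvVis V pd.1 pd.2 = false := by rw [hpd]; exact hfresh0
      have hrelpd : pvRel v p pd := ⟨hone, honepd, hd0⟩
      have hpdnotV : pd ∉ pvVsA v V := by
        rintro ⟨-, hvis⟩; rw [hfresh] at hvis; exact absurd hvis (by simp)
      have hins : pvVsA v (pvMark V pd.1 pd.2) = insert pd (pvVsA v V) :=
        pvVsA_mark v V pd hs hinB
      have hs' : pvShape v (pvMark V pd.1 pd.2) := pvShape_mark v V pd hs hinB
      have hnd' : (Q ++ [pd]).Nodup := by
        rw [List.nodup_append]
        refine ⟨hnd, by simp, ?_⟩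
        intro a ha b hb
        have hbp : b = pd := List.mem_singleton.mp hb
        subst hbp
        rintro rfl
        exact absurd (hQ _ ha) hpdnotV
      have hQ' : ∀ q ∈ Q ++ [pd], q ∈ pvVsA v (pvMark V pd.1 pd.2) := by
        intro q hq
        rw [hins]
        rcases List.mem_append.mp hq with h | h
        · exact Set.mem_insert_of_mem _ (hQ q h)
        · simp at h; subst h; exact Set.mem_insert _ _
      obtain ⟨C1, C2, C3, C4, C5, C6, C7, C8, C9, C10⟩ :=
        ih (Q ++ [pd]) (pvMark V pd.1 pd.2) (area + 1) hs' hnd' hQ'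
          (fun d' hd' => hdirs d' (by simp [hd']))
      obtain ⟨L, hL⟩ := C8
      have hpdR1 : pd ∈ (dirs.foldl (pvStepA v (v.length : Int) (v.headI.length : Int) p.1 p.2)
          (Q ++ [pd], pvMark V pd.1 pd.2, area + 1)).1 := by
        rw [hL]; simp
      refine ⟨C1, ?_, ?_, ?_, ?_, C6, C7, ⟨pd :: L, by rw [hL]; simp⟩, ?_, ?_⟩
      -- subset
      · intro x hx
        exact C2 (hins ▸ Set.mem_insert_of_mem _ hx)
      -- where new marks come from
      · intro x hx
        rcases C3 x hx with h | h
        · rw [hins] at h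
          rcases Set.mem_insert_iff.mp h with rfl | h
          · exact Or.inr ⟨hrelpd, hpdR1⟩
          · exact Or.inl h
        · exact Or.inr h
      -- every processed direction is visited afterwards
      · intro d' hd' hone'
        rcases List.mem_cons.mp hd' with rfl | hd'
        · exact C2 (hins ▸ Set.mem_insert _ _)
        · exact C4 d' hd' hone'
      -- queue elements
      · intro q hq
        rcases C5 q hq with h | h
        · rcases List.mem_append.mp h with h | h
          · exact Or.inl h
          · simp at h; subst h; exact Or.inr hrelpd
        · exact Or.inr h
      -- fuel bookkeeping
      · have hfm := pvFalses_mark v V pd hs hinB hfresh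
        simp only [List.length_append, List.length_cons, List.length_nil] at C9 ⊢
        omega
      -- area bookkeeping
      · have hfin := pvVsA_finite v (dirs.foldl
          (pvStepA v (v.length : Int) (v.headI.length : Int) p.1 p.2)
          (Q ++ [pd], pvMark V pd.1 pd.2, area + 1)).2.1
        have hpdR : pd ∈ pvVsA v (dirs.foldl
            (pvStepA v (v.length : Int) (v.headI.length : Int) p.1 p.2)
            (Q ++ [pd], pvMark V pd.1 pd.2, area + 1)).2.1 :=
          C2 (hins ▸ Set.mem_insert _ _)
        have hstepn := pv_ncard_step (pvVsA v V) _ hfin pd hpdR hpdnotV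
        rw [hins] at C10
        rw [C10, hstepn]
        push_cast
        ring
    · -- nothing to do for this direction
      have hstep : pvStepA v (v.length : Int) (v.headI.length : Int) p.1 p.2 (Q, V, area) d
          = (Q, V, area) := by
        unfold pvStepA; rw [if_neg hg]
      rw [hstep]
      obtain ⟨C1, C2, C3, C4, C5, C6, C7, C8, C9, C10⟩ :=
        ih Q V area hs hnd hQ (fun d' hd' => hdirs d' (by simp [hd']))
      refine ⟨C1, C2, C3, ?_, C5, C6, C7, C8, C9, C10⟩
      intro d' hd' hone'
      rcases List.mem_cons.mp hd' with rfl | hd'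
      · -- the guard failed, yet the cell is an in-bounds 1-cell: it was already visited
        obtain ⟨⟨g1, g2, g3, g4⟩, g5⟩ := hone'
        rcases Bool.eq_false_or_eq_true (pvVis V (p.1 + d'.1) (p.2 + d'.2)) with h | h
        · refine C2 ?_
          show pvInB v _ ∧ pvVis V (p.1 + d'.1) (p.2 + d'.2) = true
          exact ⟨⟨g1, g2, g3, g4⟩, h⟩
        · exact absurd ⟨g1, g2, g3, g4, g5, h⟩ hg
      · exact C4 d' hd' hone'

lemma pvNbrsFoldB (v : List (List Int)) (p : Int × Int) (hone : pvOne v p) :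
    ∀ (nbs : List (Int × Int)) (Q : List (Int × Int)) (S : PySem.Set (Int × Int)) (area : Int),
    S.Nodup → Q.Nodup → (∀ q ∈ Q, q ∈ pvVsB S) → (∀ x ∈ nbs, x ∈ pvNbrs p) →
    (let R := nbs.foldl (pvStepB v (v.length : Int) (v.headI.length : Int)) (Q, S, area)
     R.2.1.Nodup ∧ pvVsB S ⊆ pvVsB R.2.1 ∧
     (∀ x ∈ pvVsB R.2.1, x ∈ pvVsB S ∨ (pvRel v p x ∧ x ∈ R.1)) ∧
     (∀ q ∈ nbs, pvOne v q → q ∈ pvVsB R.2.1) ∧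
     (∀ q ∈ R.1, q ∈ Q ∨ pvRel v p q) ∧ R.1.Nodup ∧ (∀ q ∈ R.1, q ∈ pvVsB R.2.1) ∧
     (∃ L, R.1 = Q ++ L) ∧
     pvFree (v.length : Int) (v.headI.length : Int) R.2.1 + R.1.length
       = pvFree (v.length : Int) (v.headI.length : Int) S + Q.length ∧
     R.2.2 = area + ((pvVsB R.2.1 \ pvVsB S).ncard : Int)) := by
  intro nbs
  induction nbs with
  | nil =>
    intro Q S area hS hnd hQ _
    refine ⟨hS, fun x hx => hx, fun x hx => Or.inl hx, by simp, fun q hq => Or.inl hq,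
      hnd, hQ, ⟨[], by simp⟩, rfl, by simp⟩
  | cons n nbs ih =>
    intro Q S area hS hnd hQ hnbs
    have hn0 : n ∈ pvNbrs p := hnbs n (by simp)
    simp only [List.foldl_cons]
    by_cases hg : 0 ≤ n.1 ∧ n.1 < (v.length : Int) ∧ 0 ≤ n.2 ∧
        n.2 < (v.headI.length : Int) ∧ pvCell v n.1 n.2 = 1 ∧
        PySem.Set.contains S n = false
    · -- the neighbour is a fresh in-bounds 1-cell: push it and put it in the visited set
      have hstep : pvStepB v (v.length : Int) (v.headI.length : Int) (Q, S, area) n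
          = (Q ++ [n], PySem.Set.add S n, area + 1) := by
        unfold pvStepB; rw [if_pos hg]
      rw [hstep]
      obtain ⟨hb1, hb2, hb3, hb4, hcell, hfresh⟩ := hg
      have hinB : pvInB v n := ⟨hb1, hb2, hb3, hb4⟩
      have honen : pvOne v n := ⟨hinB, hcell⟩
      have hreln : pvRel v p n := ⟨hone, honen, hn0⟩
      have hnnotS : n ∉ pvVsB S := by
        intro hmem
        have hm2 : n ∈ S := hmem
        rw [← PySem.Set.contains_iff, hfresh] at hm2
        exact absurd hm2 (by simp)
      have hins : pvVsB (PySem.Set.add S n) = insert n (pvVsB S) := pvVsB_add S n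
      have hS' : (PySem.Set.add S n).Nodup := PySem.Set.nodup_add S n hS
      have hnd' : (Q ++ [n]).Nodup := by
        rw [List.nodup_append]
        refine ⟨hnd, by simp, ?_⟩
        intro a ha b hb
        have hbp : b = n := List.mem_singleton.mp hb
        subst hbp
        rintro rfl
        exact absurd (hQ _ ha) hnnotS
      have hQ' : ∀ q ∈ Q ++ [n], q ∈ pvVsB (PySem.Set.add S n) := by
        intro q hq
        rw [hins]
        rcases List.mem_append.mp hq with h | h
        · exact Set.mem_insert_of_mem _ (hQ q h)
        · simp at h; subst h; exact Set.mem_insert _ _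
      obtain ⟨C1, C2, C3, C4, C5, C6, C7, C8, C9, C10⟩ :=
        ih (Q ++ [n]) (PySem.Set.add S n) (area + 1) hS' hnd' hQ'
          (fun n' hn' => hnbs n' (by simp [hn']))
      obtain ⟨L, hL⟩ := C8
      have hnR1 : n ∈ (nbs.foldl (pvStepB v (v.length : Int) (v.headI.length : Int))
          (Q ++ [n], PySem.Set.add S n, area + 1)).1 := by
        rw [hL]; simp
      refine ⟨C1, ?_, ?_, ?_, ?_, C6, C7, ⟨n :: L, by rw [hL]; simp⟩, ?_, ?_⟩
      -- subset
      · intro x hx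
        exact C2 (hins ▸ Set.mem_insert_of_mem _ hx)
      -- where new members come from
      · intro x hx
        rcases C3 x hx with h | h
        · rw [hins] at h
          rcases Set.mem_insert_iff.mp h with rfl | h
          · exact Or.inr ⟨hreln, hnR1⟩
          · exact Or.inl h
        · exact Or.inr h
      -- every processed neighbour is visited afterwards
      · intro n' hn' hone'
        rcases List.mem_cons.mp hn' with rfl | hn'
        · exact C2 (hins ▸ Set.mem_insert _ _)
        · exact C4 n' hn' hone'
      -- stack elements
      · intro q hq
        rcases C5 q hq with h | h
        · rcases List.mem_append.mp h with h | h
          · exact Or.inl h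
          · simp at h; subst h; exact Or.inr hreln
        · exact Or.inr h
      -- fuel bookkeeping
      · have hfm := pvFree_add v S n hinB (by
          intro hmem; exact hnnotS hmem)
        simp only [List.length_append, List.length_cons, List.length_nil] at C9 ⊢
        omega
      -- area bookkeeping
      · have hfin := pvVsB_finite (nbs.foldl
          (pvStepB v (v.length : Int) (v.headI.length : Int))
          (Q ++ [n], PySem.Set.add S n, area + 1)).2.1
        have hnR : n ∈ pvVsB (nbs.foldl
            (pvStepB v (v.length : Int) (v.headI.length : Int))
            (Q ++ [n], PySem.Set.add S n, area + 1)).2.1 :=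
          C2 (hins ▸ Set.mem_insert _ _)
        have hstepn := pv_ncard_step (pvVsB S) _ hfin n hnR hnnotS
        rw [hins] at C10
        rw [C10, hstepn]
        push_cast
        ring
    · -- nothing to do for this neighbour
      have hstep : pvStepB v (v.length : Int) (v.headI.length : Int) (Q, S, area) n
          = (Q, S, area) := by
        unfold pvStepB; rw [if_neg hg]
      rw [hstep]
      obtain ⟨C1, C2, C3, C4, C5, C6, C7, C8, C9, C10⟩ :=
        ih Q S area hS hnd hQ (fun n' hn' => hnbs n' (by simp [hn']))
      refine ⟨C1, C2, C3, ?_, C5, C6, C7, C8, C9, C10⟩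
      intro n' hn' hone'
      rcases List.mem_cons.mp hn' with rfl | hn'
      · obtain ⟨⟨g1, g2, g3, g4⟩, g5⟩ := hone'
        rcases Bool.eq_false_or_eq_true (PySem.Set.contains S n') with h | h
        · refine C2 ?_
          show n' ∈ S
          rw [← PySem.Set.contains_iff, h]
        · exact absurd ⟨g1, g2, g3, g4, g5, h⟩ hg
      · exact C4 n' hn' hone' 

lemma pvFloodA_spec (v : List (List Int)) (seed : Int × Int) :
    ∀ (fuel : Nat) (Q : List (Int × Int)) (V : List (List Bool)) (area : Int),
    pvShape v V → pvFalses V + Q.length < fuel → Q.Nodup →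
    (∀ p ∈ Q, p ∈ pvVsA v V) → (∀ p ∈ Q, pvOne v p ∧ pvReach v seed p) →
    (∀ p ∈ pvVsA v V, p ∉ Q → ∀ q, pvRel v p q → q ∈ pvVsA v V) →
    (let R := pvFloodA v (v.length : Int) (v.headI.length : Int) fuel Q V area
     pvShape v R.1 ∧ pvVsA v V ⊆ pvVsA v R.1 ∧
     (∀ x ∈ pvVsA v R.1, x ∈ pvVsA v V ∨ pvReach v seed x) ∧
     pvClosed v (pvVsA v R.1) ∧
     R.2 = area + ((pvVsA v R.1 \ pvVsA v V).ncard : Int)) := by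
  intro fuel
  induction fuel with
  | zero =>
    intro Q V area _ hfuel _ _ _ _
    exact absurd hfuel (Nat.not_lt_zero _)
  | succ fuel ih =>
    intro Q V area hs hfuel hnd hQv hQr hcl
    match Q with
    | [] =>
      refine ⟨hs, fun x hx => hx, fun x hx => Or.inl hx, ?_, by rw [pvFloodA]; simp⟩
      intro x hx q hq
      exact hcl x hx (by simp) q hq
    | p :: Q' =>
      obtain ⟨honep, hreachp⟩ := hQr p (by simp)
      have hdirs : ∀ d ∈ pvDirs, (p.1 + d.1, p.2 + d.2) ∈ pvNbrs p := by
        intro d hd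
        simp only [pvDirs, List.mem_cons, List.not_mem_nil, or_false] at hd
        rcases hd with rfl | rfl | rfl | rfl <;> simp [pvNbrs, sub_eq_add_neg]
      obtain ⟨C1, C2, C3, C4, C5, C6, C7, C8, C9, C10⟩ :=
        pvDirsFoldA v p honep pvDirs Q' V area hs (List.Nodup.of_cons hnd)
          (fun q hq => hQv q (List.mem_cons_of_mem _ hq)) hdirs
      set st := pvDirs.foldl (pvStepA v (v.length : Int) (v.headI.length : Int) p.1 p.2)
        (Q', V, area) with hst
      obtain ⟨L, hL⟩ := C8
      have hC4' : ∀ q, q ∈ pvNbrs p → pvOne v q → q ∈ pvVsA v st.2.1 := by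
        intro q hq hone'
        have hex : ∃ d ∈ pvDirs, q = (p.1 + d.1, p.2 + d.2) := by
          simp only [pvNbrs, List.mem_cons, List.not_mem_nil, or_false] at hq
          rcases hq with rfl | rfl | rfl | rfl
          · exact ⟨(0, 1), by simp [pvDirs], by simp⟩
          · exact ⟨(1, 0), by simp [pvDirs], by simp⟩
          · exact ⟨(0, -1), by simp [pvDirs], by simp [sub_eq_add_neg]⟩
          · exact ⟨(-1, 0), by simp [pvDirs], by simp [sub_eq_add_neg]⟩
        obtain ⟨d, hd, rfl⟩ := hex
        exact C4 d hd hone'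
      have hclosed' : ∀ x ∈ pvVsA v st.2.1, x ∉ st.1 → ∀ q, pvRel v x q → q ∈ pvVsA v st.2.1 := by
        intro x hx hxq q hq
        rcases C3 x hx with hxV | ⟨-, hxin⟩
        · by_cases hxp : x = p
          · subst hxp
            exact hC4' q hq.2.2 hq.2.1
          · have hxQ' : x ∉ Q' := by
              intro hmem; exact hxq (hL ▸ List.mem_append_left _ hmem)
            have hxQ : x ∉ p :: Q' := by
              simp [hxp, hxQ']
            exact C2 (hcl x hxV hxQ q hq)
        · exact absurd hxin hxq
      have hrch' : ∀ q ∈ st.1, pvOne v q ∧ pvReach v seed q := by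
        intro q hq
        rcases C5 q hq with h | h
        · exact hQr q (List.mem_cons_of_mem _ h)
        · exact ⟨h.2.1, Relation.ReflTransGen.tail hreachp h⟩
      have hfuel' : pvFalses st.2.1 + st.1.length < fuel := by
        simp only [List.length_cons] at hfuel
        omega
      obtain ⟨D1, D2, D3, D4, D5⟩ := ih st.1 st.2.1 st.2.2 C1 hfuel' C6 C7 hrch' hclosed'
      have hgoal : pvFloodA v (v.length : Int) (v.headI.length : Int) (fuel + 1) (p :: Q') V area
          = pvFloodA v (v.length : Int) (v.headI.length : Int) fuel st.1 st.2.1 st.2.2 := by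
        rw [pvFloodA]
      rw [hgoal]
      refine ⟨D1, fun x hx => D2 (C2 hx), ?_, D4, ?_⟩
      · intro x hx
        rcases D3 x hx with h | h
        · rcases C3 x h with h2 | ⟨h2, -⟩
          · exact Or.inl h2
          · exact Or.inr (Relation.ReflTransGen.tail hreachp h2)
        · exact Or.inr h
      · have hfin := pvVsA_finite v
          (pvFloodA v (v.length : Int) (v.headI.length : Int) fuel st.1 st.2.1 st.2.2).1
        have hsplit := pv_ncard_split (pvVsA v V) (pvVsA v st.2.1)
          (pvVsA v (pvFloodA v (v.length : Int) (v.headI.length : Int) fuel st.1 st.2.1 st.2.2).1)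
          C2 D2 hfin
        omega

lemma pvFloodB_spec (v : List (List Int)) (seed : Int × Int) :
    ∀ (fuel : Nat) (Q : List (Int × Int)) (S : PySem.Set (Int × Int)) (area : Int),
    S.Nodup → pvFree (v.length : Int) (v.headI.length : Int) S + Q.length < fuel → Q.Nodup →
    (∀ p ∈ Q, p ∈ pvVsB S) → (∀ p ∈ Q, pvOne v p ∧ pvReach v seed p) →
    (∀ p ∈ pvVsB S, p ∉ Q → ∀ q, pvRel v p q → q ∈ pvVsB S) →
    (let R := pvFloodB v (v.length : Int) (v.headI.length : Int) fuel Q S area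
     R.1.Nodup ∧ pvVsB S ⊆ pvVsB R.1 ∧
     (∀ x ∈ pvVsB R.1, x ∈ pvVsB S ∨ pvReach v seed x) ∧
     pvClosed v (pvVsB R.1) ∧
     R.2 = area + ((pvVsB R.1 \ pvVsB S).ncard : Int)) := by
  intro fuel
  induction fuel with
  | zero =>
    intro Q S area _ hfuel _ _ _ _
    exact absurd hfuel (Nat.not_lt_zero _)
  | succ fuel ih =>
    intro Q S area hS hfuel hnd hQv hQr hcl
    rcases List.eq_nil_or_concat' Q with rfl | ⟨Q', p, rfl⟩
    · refine ⟨hS, fun x hx => hx, fun x hx => Or.inl hx, ?_, by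
        rw [pvFloodB, show PySem.List.pop? ([] : List (Int × Int)) (-1) = none from rfl]
        simp⟩
      intro x hx q hq
      exact hcl x hx (by simp) q hq
    · obtain ⟨honep, hreachp⟩ := hQr p (by simp)
      have hpop : PySem.List.pop? (Q' ++ [p]) (-1) = some (p, Q') := PySem.List.pop?_last Q' p
      have hndQ : Q'.Nodup := (List.nodup_append.mp hnd).1
      have hpQ' : p ∉ Q' := by
        intro hmem
        exact (List.nodup_append.mp hnd).2.2 p hmem p (by simp) rfl
      obtain ⟨C1, C2, C3, C4, C5, C6, C7, C8, C9, C10⟩ :=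
        pvNbrsFoldB v p honep (pvNbrs p) Q' S area hS hndQ
          (fun q hq => hQv q (List.mem_append_left _ hq)) (fun x hx => hx)
      set st := (pvNbrs p).foldl (pvStepB v (v.length : Int) (v.headI.length : Int))
        (Q', S, area) with hst
      obtain ⟨L, hL⟩ := C8
      have hclosed' : ∀ x ∈ pvVsB st.2.1, x ∉ st.1 → ∀ q, pvRel v x q → q ∈ pvVsB st.2.1 := by
        intro x hx hxq q hq
        rcases C3 x hx with hxV | ⟨-, hxin⟩
        · by_cases hxp : x = p
          · subst hxp
            exact C4 q hq.2.2 hq.2.1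
          · have hxQ' : x ∉ Q' := by
              intro hmem; exact hxq (hL ▸ List.mem_append_left _ hmem)
            have hxQ : x ∉ Q' ++ [p] := by
              simp [hxp, hxQ']
            exact C2 (hcl x hxV hxQ q hq)
        · exact absurd hxin hxq
      have hrch' : ∀ q ∈ st.1, pvOne v q ∧ pvReach v seed q := by
        intro q hq
        rcases C5 q hq with h | h
        · exact hQr q (List.mem_append_left _ h)
        · exact ⟨h.2.1, Relation.ReflTransGen.tail hreachp h⟩
      have hfuel' : pvFree (v.length : Int) (v.headI.length : Int) st.2.1 + st.1.length
          < fuel := by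
        simp only [List.length_append, List.length_cons, List.length_nil] at hfuel
        omega
      obtain ⟨D1, D2, D3, D4, D5⟩ := ih st.1 st.2.1 st.2.2 C1 hfuel' C6 C7 hrch' hclosed'
      have hgoal : pvFloodB v (v.length : Int) (v.headI.length : Int) (fuel + 1)
            (Q' ++ [p]) S area
          = pvFloodB v (v.length : Int) (v.headI.length : Int) fuel st.1 st.2.1 st.2.2 := by
        rw [pvFloodB, hpop]
      rw [hgoal]
      refine ⟨D1, fun x hx => D2 (C2 hx), ?_, D4, ?_⟩
      · intro x hx
        rcases D3 x hx with h | h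
        · rcases C3 x h with h2 | ⟨h2, -⟩
          · exact Or.inl h2
          · exact Or.inr (Relation.ReflTransGen.tail hreachp h2)
        · exact Or.inr h
      · have hfin := pvVsB_finite
          (pvFloodB v (v.length : Int) (v.headI.length : Int) fuel st.1 st.2.1 st.2.2).1
        have hsplit := pv_ncard_split (pvVsB S) (pvVsB st.2.1)
          (pvVsB (pvFloodB v (v.length : Int) (v.headI.length : Int) fuel st.1 st.2.1 st.2.2).1)
          C2 D2 hfin
        omega

-- a visited set that is a union of already closed components, plus the closure and
-- reachability facts delivered by a flood, IS base ∪ component(seed)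
lemma pv_flood_set_eq (v : List (List Int)) (seed : Int × Int) (base R : Set (Int × Int))
    (hsub : base ⊆ R) (hseed : seed ∈ R)
    (hrch : ∀ p ∈ R, p ∈ base ∨ pvReach v seed p) (hcl : pvClosed v R) :
    R = base ∪ {p | pvReach v seed p} := by
  ext x
  constructor
  · intro hx
    rcases hrch x hx with h | h
    · exact Or.inl h
    · exact Or.inr h
  · rintro (h | h)
    · exact hsub h
    · induction h with
      | refl => exact hseed
      | tail hab hbc ih => exact hcl _ ih _ hbc

lemma pvClosed_union_reach (v : List (List Int)) (seed : Int × Int) (s : Set (Int × Int))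
    (hs : pvClosed v s) : pvClosed v (s ∪ {p | pvReach v seed p}) := by
  rintro p (hp | hp) q hq
  · exact Or.inl (hs p hp q hq)
  · exact Or.inr (Relation.ReflTransGen.tail hp hq)

-- packaged per-seed runs of the two floods
lemma pvFloodA_run (v : List (List Int)) (seed : Int × Int) (V : List (List Bool))
    (hs : pvShape v V) (hone : pvOne v seed) (hnv : seed ∉ pvVsA v V)
    (hcl : pvClosed v (pvVsA v V)) :
    (let V1 := pvMark V seed.1 seed.2
     let res := pvFloodA v (v.length : Int) (v.headI.length : Int) (pvFalses V1 + 2) [seed] V1 1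
     pvShape v res.1 ∧ pvVsA v res.1 = pvVsA v V ∪ {p | pvReach v seed p} ∧
     res.2 = ((pvVsA v res.1 \ pvVsA v V).ncard : Int)) := by
  have hins : pvVsA v (pvMark V seed.1 seed.2) = insert seed (pvVsA v V) :=
    pvVsA_mark v V seed hs hone.1
  have hs1 : pvShape v (pvMark V seed.1 seed.2) := pvShape_mark v V seed hs hone.1
  have hcl1 : ∀ p ∈ pvVsA v (pvMark V seed.1 seed.2), p ∉ [seed] →
      ∀ q, pvRel v p q → q ∈ pvVsA v (pvMark V seed.1 seed.2) := by
    intro x hx hxs q hq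
    rw [hins] at hx ⊢
    rcases Set.mem_insert_iff.mp hx with rfl | hx
    · exact absurd (by simp) hxs
    · exact Set.mem_insert_of_mem _ (hcl x hx q hq)
  obtain ⟨E1, E2, E3, E4, E5⟩ := pvFloodA_spec v seed (pvFalses (pvMark V seed.1 seed.2) + 2)
    [seed] (pvMark V seed.1 seed.2) 1 hs1 (by simp) (by simp)
    (by intro p hp; simp at hp; subst hp; rw [hins]; exact Set.mem_insert _ _)
    (by intro p hp; simp at hp; subst hp; exact ⟨hone, Relation.ReflTransGen.refl⟩)
    hcl1
  have hseedR : seed ∈ pvVsA v (pvFloodA v (v.length : Int) (v.headI.length : Int)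
      (pvFalses (pvMark V seed.1 seed.2) + 2) [seed] (pvMark V seed.1 seed.2) 1).1 :=
    E2 (hins ▸ Set.mem_insert _ _)
  have hseteq := pv_flood_set_eq v seed (pvVsA v V) _
    (fun x hx => E2 (hins ▸ Set.mem_insert_of_mem _ hx)) hseedR
    (by
      intro x hx
      rcases E3 x hx with h | h
      · rw [hins] at h
        rcases Set.mem_insert_iff.mp h with rfl | h
        · exact Or.inr Relation.ReflTransGen.refl
        · exact Or.inl h
      · exact Or.inr h)
    E4
  refine ⟨E1, hseteq, ?_⟩
  have hfin := pvVsA_finite v (pvFloodA v (v.length : Int) (v.headI.length : Int)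
      (pvFalses (pvMark V seed.1 seed.2) + 2) [seed] (pvMark V seed.1 seed.2) 1).1
  have hstep := pv_ncard_step (pvVsA v V) _ hfin seed hseedR hnv
  rw [hins] at E5
  omega

lemma pvFloodB_run (v : List (List Int)) (seed : Int × Int) (S : PySem.Set (Int × Int))
    (hnd : S.Nodup) (hone : pvOne v seed) (hnv : seed ∉ pvVsB S)
    (hcl : pvClosed v (pvVsB S)) :
    (let S1 := PySem.Set.add S seed
     let res := pvFloodB v (v.length : Int) (v.headI.length : Int)
        (pvFree (v.length : Int) (v.headI.length : Int) S1 + 2) [seed] S1 1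
     res.1.Nodup ∧ pvVsB res.1 = pvVsB S ∪ {p | pvReach v seed p} ∧
     res.2 = ((pvVsB res.1 \ pvVsB S).ncard : Int)) := by
  have hins : pvVsB (PySem.Set.add S seed) = insert seed (pvVsB S) := pvVsB_add S seed
  have hnd1 : (PySem.Set.add S seed).Nodup := PySem.Set.nodup_add S seed hnd
  have hcl1 : ∀ p ∈ pvVsB (PySem.Set.add S seed), p ∉ [seed] →
      ∀ q, pvRel v p q → q ∈ pvVsB (PySem.Set.add S seed) := by
    intro x hx hxs q hq
    rw [hins] at hx ⊢
    rcases Set.mem_insert_iff.mp hx with rfl | hx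
    · exact absurd (by simp) hxs
    · exact Set.mem_insert_of_mem _ (hcl x hx q hq)
  obtain ⟨E1, E2, E3, E4, E5⟩ := pvFloodB_spec v seed
    (pvFree (v.length : Int) (v.headI.length : Int) (PySem.Set.add S seed) + 2)
    [seed] (PySem.Set.add S seed) 1 hnd1 (by simp) (by simp)
    (by intro p hp; simp at hp; subst hp; rw [hins]; exact Set.mem_insert _ _)
    (by intro p hp; simp at hp; subst hp; exact ⟨hone, Relation.ReflTransGen.refl⟩)
    hcl1
  have hseedR : seed ∈ pvVsB (pvFloodB v (v.length : Int) (v.headI.length : Int)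
      (pvFree (v.length : Int) (v.headI.length : Int) (PySem.Set.add S seed) + 2)
      [seed] (PySem.Set.add S seed) 1).1 :=
    E2 (hins ▸ Set.mem_insert _ _)
  have hseteq := pv_flood_set_eq v seed (pvVsB S) _
    (fun x hx => E2 (hins ▸ Set.mem_insert_of_mem _ hx)) hseedR
    (by
      intro x hx
      rcases E3 x hx with h | h
      · rw [hins] at h
        rcases Set.mem_insert_iff.mp h with rfl | h
        · exact Or.inr Relation.ReflTransGen.refl
        · exact Or.inl h
      · exact Or.inr h)
    E4
  refine ⟨E1, hseteq, ?_⟩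
  have hfin := pvVsB_finite (pvFloodB v (v.length : Int) (v.headI.length : Int)
      (pvFree (v.length : Int) (v.headI.length : Int) (PySem.Set.add S seed) + 2)
      [seed] (PySem.Set.add S seed) 1).1
  have hstep := pv_ncard_step (pvVsB S) _ hfin seed hseedR hnv
  rw [hins] at E5
  omega

-- the common enumeration order of the two outer loops
def pvCells (v : List (List Int)) : List (Int × Int) :=
  (PySem.List.pyRange 0 (v.length : Int) 1).flatMap
    (fun r => (PySem.List.pyRange 0 (v.headI.length : Int) 1).map (fun c => (r, c)))

lemma pvCells_inB (v : List (List Int)) (p : Int × Int) (hp : p ∈ pvCells v) : pvInB v p := by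
  unfold pvCells at hp
  obtain ⟨r, hr, hmem⟩ := List.mem_flatMap.mp hp
  obtain ⟨c, hc, rfl⟩ := List.mem_map.mp hmem
  obtain ⟨hr1, hr2⟩ := (PySem.List.mem_pyRange_one).mp hr
  obtain ⟨hc1, hc2⟩ := (PySem.List.mem_pyRange_one).mp hc
  exact ⟨hr1, hr2, hc1, hc2⟩

lemma pvRange_flatten_nat (m n : Nat) :
    PySem.List.pyRange 0 ((m : Int) * (n : Int)) 1
      = ((PySem.List.pyRange 0 (m : Int) 1).flatMap
          (fun r => (PySem.List.pyRange 0 (n : Int) 1).map (fun c => (r, c)))).map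
        (fun p => p.1 * (n : Int) + p.2) := by
  induction m with
  | zero =>
    have hz : PySem.List.pyRange 0 (0 : Int) 1 = [] := PySem.List.pyRange_one_eq_nil le_rfl
    simp [hz]
  | succ m ih =>
    have h1 : ((m + 1 : Nat) : Int) * (n : Int) = (m : Int) * (n : Int) + (n : Int) := by
      push_cast; ring
    have h2 : PySem.List.pyRange 0 (((m : Int) * n) + n) 1
        = PySem.List.pyRange 0 ((m : Int) * n) 1
          ++ PySem.List.pyRange ((m : Int) * n) ((m : Int) * n + n) 1 :=
      PySem.List.pyRange_one_append 0 ((m : Int) * n) ((m : Int) * n + n)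
        (by positivity) (by omega)
    have h3 : ((m + 1 : Nat) : Int) = (m : Int) + 1 := by push_cast; ring
    have h4 : PySem.List.pyRange 0 ((m : Int) + 1) 1
        = PySem.List.pyRange 0 (m : Int) 1 ++ [(m : Int)] :=
      PySem.List.pyRange_one_succ_right (by positivity)
    rw [h1, h2, h3, h4, ih]
    rw [List.flatMap_append, List.map_append]
    congr 1
    -- the last row: range(m*n, m*n+n) versus m paired with range(n)
    rw [PySem.List.pyRange_one, PySem.List.pyRange_one]
    simp only [sub_zero, add_sub_cancel_left, List.flatMap_cons, List.flatMap_nil,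
      List.append_nil, List.map_map]
    apply List.map_congr_left
    intro k _
    simp

lemma pvRange_flatten (v : List (List Int)) :
    PySem.List.pyRange 0 ((v.length : Int) * (v.headI.length : Int)) 1
      = (pvCells v).map (fun p => p.1 * (v.headI.length : Int) + p.2) := by
  unfold pvCells
  exact pvRange_flatten_nat v.length v.headI.length

-- the joint invariant of the two outer scans
def pvInv (v : List (List Int)) (a : List (List Bool) × Int × Int)
    (b : PySem.Set (Int × Int) × Int × Int) : Prop :=
  pvVsA v a.1 = pvVsB b.1 ∧ pvShape v a.1 ∧ b.1.Nodup ∧ pvClosed v (pvVsB b.1) ∧ a.2 = b.2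

lemma pvOuter (v : List (List Int)) :
    ∀ (cs : List (Int × Int)) (a : List (List Bool) × Int × Int)
      (b : PySem.Set (Int × Int) × Int × Int),
    (∀ p ∈ cs, pvInB v p) → pvInv v a b →
    pvInv v
      (cs.foldl (fun st p =>
        if pvCell v p.1 p.2 = 1 ∧ pvVis st.1 p.1 p.2 = false then
          let V1 := pvMark st.1 p.1 p.2
          let res := pvFloodA v (v.length : Int) (v.headI.length : Int) (pvFalses V1 + 2) [p] V1 1
          (res.1, st.2.1 + 1, max st.2.2 res.2)
        else st) a)
      (cs.foldl (fun st p =>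
        if pvCell v p.1 p.2 = 1 ∧ PySem.Set.contains st.1 p = false then
          let S1 := PySem.Set.add st.1 p
          let res := pvFloodB v (v.length : Int) (v.headI.length : Int)
            (pvFree (v.length : Int) (v.headI.length : Int) S1 + 2) [p] S1 1
          (res.1, st.2.1 + 1, if res.2 > st.2.2 then res.2 else st.2.2)
        else st) b) := by
  intro cs
  induction cs with
  | nil => intro a b _ hinv; exact hinv
  | cons p cs ih =>
    intro a b hcells hinv
    obtain ⟨hAB, hshape, hnod, hclosed, hcm⟩ := hinv
    have hinB : pvInB v p := hcells p (by simp)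
    have hclosedA : pvClosed v (pvVsA v a.1) := by rw [hAB]; exact hclosed
    have hvis_iff : pvVis a.1 p.1 p.2 = PySem.Set.contains b.1 p := by
      rw [Bool.eq_iff_iff, PySem.Set.contains_iff]
      constructor
      · intro h
        have : p ∈ pvVsA v a.1 := ⟨hinB, h⟩
        rw [hAB] at this
        exact this
      · intro h
        have hmem : p ∈ pvVsB b.1 := h
        rw [← hAB] at hmem
        exact hmem.2
    simp only [List.foldl_cons]
    by_cases hg : pvCell v p.1 p.2 = 1 ∧ pvVis a.1 p.1 p.2 = false
    · have hgB : pvCell v p.1 p.2 = 1 ∧ PySem.Set.contains b.1 p = false :=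
        ⟨hg.1, hvis_iff ▸ hg.2⟩
      rw [if_pos hg, if_pos hgB]
      have hone : pvOne v p := ⟨hinB, hg.1⟩
      have hnvA : p ∉ pvVsA v a.1 := by
        rintro ⟨-, hvis⟩; rw [hg.2] at hvis; exact absurd hvis (by simp)
      have hnvB : p ∉ pvVsB b.1 := by rw [← hAB]; exact hnvA
      obtain ⟨F1, F2, F3⟩ := pvFloodA_run v p a.1 hshape hone hnvA hclosedA
      obtain ⟨G1, G2, G3⟩ := pvFloodB_run v p b.1 hnod hone hnvB hclosed
      have hseteq : pvVsA v (pvFloodA v (v.length : Int) (v.headI.length : Int)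
            (pvFalses (pvMark a.1 p.1 p.2) + 2) [p] (pvMark a.1 p.1 p.2) 1).1
          = pvVsB (pvFloodB v (v.length : Int) (v.headI.length : Int)
            (pvFree (v.length : Int) (v.headI.length : Int) (PySem.Set.add b.1 p) + 2)
            [p] (PySem.Set.add b.1 p) 1).1 := by
        rw [F2, G2, hAB]
      have hareaeq : (pvFloodA v (v.length : Int) (v.headI.length : Int)
            (pvFalses (pvMark a.1 p.1 p.2) + 2) [p] (pvMark a.1 p.1 p.2) 1).2
          = (pvFloodB v (v.length : Int) (v.headI.length : Int)
            (pvFree (v.length : Int) (v.headI.length : Int) (PySem.Set.add b.1 p) + 2)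
            [p] (PySem.Set.add b.1 p) 1).2 := by
        rw [F3, G3, hseteq, hAB]
      apply ih _ _ (fun q hq => hcells q (by simp [hq]))
      refine ⟨hseteq, F1, G1, ?_, ?_⟩
      · rw [G2]
        exact pvClosed_union_reach v p _ hclosed
      · have hm : a.2.1 = b.2.1 ∧ a.2.2 = b.2.2 := Prod.mk.injEq .. ▸ Prod.ext_iff.mp hcm
        refine Prod.ext ?_ ?_
        · simp [hm.1]
        · show max a.2.2 _ = if _ > b.2.2 then _ else b.2.2
          rw [hareaeq, hm.2, max_def]
          split_ifs <;> omega
    · have hgB : ¬(pvCell v p.1 p.2 = 1 ∧ PySem.Set.contains b.1 p = false) := by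
        rw [← hvis_iff]; exact hg
      rw [if_neg hg, if_neg hgB]
      exact ih a b (fun q hq => hcells q (by simp [hq])) ⟨hAB, hshape, hnod, hclosed, hcm⟩

lemma pvA_nested (v : List (List Int)) :
    ∀ (rl : List Int) (init : List (List Bool) × Int × Int),
    rl.foldl (fun st row => (PySem.List.pyRange 0 (v.headI.length : Int) 1).foldl (fun st col =>
        if pvCell v row col = 1 ∧ pvVis st.1 row col = false then
          let V1 := pvMark st.1 row col
          let res := pvFloodA v (v.length : Int) (v.headI.length : Int)
            (pvFalses V1 + 2) [(row, col)] V1 1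
          (res.1, st.2.1 + 1, max st.2.2 res.2)
        else st) st) init
    = (rl.flatMap (fun r => (PySem.List.pyRange 0 (v.headI.length : Int) 1).map
          (fun c => (r, c)))).foldl
        (fun st p => if pvCell v p.1 p.2 = 1 ∧ pvVis st.1 p.1 p.2 = false then
          let V1 := pvMark st.1 p.1 p.2
          let res := pvFloodA v (v.length : Int) (v.headI.length : Int) (pvFalses V1 + 2) [p] V1 1
          (res.1, st.2.1 + 1, max st.2.2 res.2)
        else st) init := by
  intro rl
  induction rl with
  | nil => intro init; rfl
  | cons r rl ih =>
    intro init
    simp only [List.foldl_cons, List.flatMap_cons, List.foldl_append, List.foldl_map]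
    exact ih _

lemma pvB_flat (v : List (List Int)) (init : PySem.Set (Int × Int) × Int × Int) :
    (PySem.List.pyRange 0 ((v.length : Int) * (v.headI.length : Int)) 1).foldl (fun st idx =>
      let r := PySem.Int.floordiv idx (v.headI.length : Int)
      let c := PySem.Int.mod idx (v.headI.length : Int)
      if pvCell v r c = 1 ∧ PySem.Set.contains st.1 (r, c) = false then
        let S1 := PySem.Set.add st.1 (r, c)
        let res := pvFloodB v (v.length : Int) (v.headI.length : Int)
          (pvFree (v.length : Int) (v.headI.length : Int) S1 + 2) [(r, c)] S1 1
        (res.1, st.2.1 + 1, if res.2 > st.2.2 then res.2 else st.2.2)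
      else st) init
    = (pvCells v).foldl (fun st p =>
        if pvCell v p.1 p.2 = 1 ∧ PySem.Set.contains st.1 p = false then
          let S1 := PySem.Set.add st.1 p
          let res := pvFloodB v (v.length : Int) (v.headI.length : Int)
            (pvFree (v.length : Int) (v.headI.length : Int) S1 + 2) [p] S1 1
          (res.1, st.2.1 + 1, if res.2 > st.2.2 then res.2 else st.2.2)
        else st) init := by
  rw [pvRange_flatten v, List.foldl_map]
  apply PySem.List.foldl_congr_mem
  intro acc p hp
  have hinB : pvInB v p := pvCells_inB v p hp
  obtain ⟨h1, h2, h3, h4⟩ := hinB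
  have hpos : (0 : Int) < (v.headI.length : Int) := by omega
  have hfd : PySem.Int.floordiv (p.1 * (v.headI.length : Int) + p.2) (v.headI.length : Int)
      = p.1 := by
    rw [PySem.Int.floordiv_eq_iff_of_pos hpos]
    constructor
    · omega
    · rw [add_mul, one_mul]; omega
  have hmd : PySem.Int.mod (p.1 * (v.headI.length : Int) + p.2) (v.headI.length : Int)
      = p.2 := by
    have h := PySem.Int.floordiv_mul_add_mod (p.1 * (v.headI.length : Int) + p.2)
      (v.headI.length : Int)
    rw [hfd] at h
    omega
  simp only [hfd, hmd, Prod.mk.eta]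

lemma pvInit (v : List (List Int)) :
    pvInv v (List.replicate v.length (List.replicate v.headI.length false), (0 : Int), (0 : Int))
      (([] : PySem.Set (Int × Int)), (0 : Int), (0 : Int)) := by
  have hshape0 : pvShape v (List.replicate v.length (List.replicate v.headI.length false)) := by
    refine ⟨List.length_replicate, ?_⟩
    intro row hm
    rw [List.eq_of_mem_replicate hm, List.length_replicate]
  have hB0 : pvVsB ([] : PySem.Set (Int × Int)) = (∅ : Set (Int × Int)) := by
    ext x; simp [pvVsB]
  have hA0 : pvVsA v (List.replicate v.length (List.replicate v.headI.length false))
      = (∅ : Set (Int × Int)) := by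
    ext p
    simp only [pvVsA, Set.mem_setOf_eq, Set.mem_empty_iff_false, iff_false]
    rintro ⟨hin, hvis⟩
    obtain ⟨a1, a2, he⟩ := pvVis_eq v _ p.1 p.2 hshape0 ⟨hin.1, hin.2.1⟩ ⟨hin.2.2.1, hin.2.2.2⟩
    rw [he] at hvis
    simp [List.getElem_replicate] at hvis
  refine ⟨by rw [hA0, hB0], hshape0, List.nodup_nil, ?_, rfl⟩
  intro x hx
  rw [hB0] at hx
  exact absurd hx (Set.notMem_empty x)

-- ===== VERDICT (by name: the statement is the Claim_ definition above) =====
theorem solution_spec : Claim_equal_solution := by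
  intro v _ _
  unfold Spec_solution solution solution_alt
  dsimp only
  rw [pvA_nested v, pvB_flat v]
  have houter := pvOuter v (pvCells v) _ _ (fun p hp => pvCells_inB v p hp) (pvInit v)
  have hcm := houter.2.2.2.2
  rw [show List.flatMap (fun r => List.map (fun c => (r, c))
        (PySem.List.pyRange 0 (v.headI.length : Int) 1))
        (PySem.List.pyRange 0 (v.length : Int) 1) = pvCells v from rfl,
      show (PySem.Set.empty : PySem.Set (Int × Int)) = [] from rfl, hcm]
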